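-- pv_equiv track=rewrite | github.com/schwallergroup/gosybench | src/syn2act/par2tree/pdf2pars.py | __clean_up_pars
-- ===== SOURCE A (Python) =====
-- def __clean_up_pars(pars):
--     all_paragraphs = []
--     new_paragraph = ''
--
--     for par in pars:
--         if par[0] == 'bold':
--             all_paragraphs.append(new_paragraph)
--             new_paragraph = ''
--         new_paragraph += par[1]
--
--     clean_up = [par for par in all_paragraphs if par != '' and not par.isspace()]
--
--     #paragraphs = []
--
--     # for par in clean_up:
--     #     new_par = Paragraph(par)
--     #     paragraphs.append(new_par)
--
--     return clean_up
-- ===== SOURCE B (Python) =====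
-- def __clean_up_pars(pars):
--     # Staged index-based algorithm: locate the bold markers, then rebuild each
--     # bold-delimited paragraph directly by slicing+joining the text column.
--     # Pairing [0]+bolds with bolds yields exactly the segments A flushes; the
--     # trailing segment (after the last bold) naturally never forms a pair.
--     texts = [t for _, t in pars]
--     bolds = [i for i, (kind, _) in enumerate(pars) if kind == 'bold']
--     segs = [''.join(texts[a:b]) for a, b in zip([0] + bolds, bolds)]
--     return [s for s in segs if s != '' and not s.isspace()]
-- ===== Notes on version B (the rewrite author's own statement) =====
-- stated objective: alternative
-- what changed: B replaces A's single-pass flush-accumulator with a staged index-based algorithm: it first extracts the text column and the positions of the 'bold' markers, then reconstructs each paragraph by slicing the text column between consecutive marker positions (zip([0]+bolds, bolds)) and joining, then filters; the trailing never-flushed segment is never formed because it has no closing marker.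
import Mathlib
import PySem

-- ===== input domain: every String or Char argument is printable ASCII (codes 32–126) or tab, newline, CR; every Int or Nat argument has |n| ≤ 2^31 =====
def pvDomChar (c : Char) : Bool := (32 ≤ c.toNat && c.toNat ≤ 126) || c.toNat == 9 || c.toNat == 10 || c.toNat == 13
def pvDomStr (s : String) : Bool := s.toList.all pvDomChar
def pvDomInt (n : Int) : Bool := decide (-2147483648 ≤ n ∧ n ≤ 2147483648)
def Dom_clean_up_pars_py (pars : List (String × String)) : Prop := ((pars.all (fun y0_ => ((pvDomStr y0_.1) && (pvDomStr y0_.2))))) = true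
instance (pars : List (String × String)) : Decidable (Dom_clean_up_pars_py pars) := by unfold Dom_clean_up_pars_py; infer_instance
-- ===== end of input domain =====

-- B replaces A's flush-accumulator pass with a staged index-based algorithm
-- (bold positions, then slice-and-join between consecutive positions);
-- objective: alternative algorithm, same cost, return value proved equal.


-- ===== PORT A =====
def clean_up_pars_py (pars : List (String × String)) : List String :=
  let st := pars.foldl (fun (st : List String × String) par =>
    let st := if par.1 == "bold" then (st.1 ++ [st.2], "") else st
    (st.1, st.2 ++ par.2)) ([], "")
  st.1.filter (fun p => p != "" && !(PySem.Str.strIsspace p))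

-- ===== PORT B =====
-- texts[a:b] has 0 ≤ a ≤ b ≤ len(texts) here, so PySem.List.slice is the exact slice.
def clean_up_pars_py_alt (pars : List (String × String)) : List String :=
  let texts := pars.map (fun p => p.2)
  let bolds := (PySem.List.enumerate pars 0).filterMap
    (fun ip => if ip.2.1 == "bold" then some ip.1 else none)
  let segs := ((0 :: bolds).zip bolds).map
    (fun ab => PySem.Str.join "" (PySem.List.slice texts (some ab.1) (some ab.2)))
  segs.filter (fun s => s != "" && !(PySem.Str.strIsspace s))

-- ===== PRECONDITION & SPEC =====
def Spec_clean_up_pars_py (pars : List (String × String)) (out : List String) : Prop := out = clean_up_pars_py_alt pars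
instance (pars : List (String × String)) (out : List String) : Decidable (Spec_clean_up_pars_py pars out) := by unfold Spec_clean_up_pars_py; infer_instance

-- ===== CLAIM (what is proved, stated in full; the proofs are below) =====
def Claim_equal_clean_up_pars_py : Prop := ∀ (pars : List (String × String)), Dom_clean_up_pars_py pars → Spec_clean_up_pars_py pars (clean_up_pars_py pars)

-- ===== LEMMAS AND PROOFS =====

-- bold-marker positions as Nats (proof-side mirror of B's `bolds`)
def pvNB : List (String × String) → List Nat
  | [] => []
  | p :: ps => (if p.1 == "bold" then [0] else []) ++ (pvNB ps).map (· + 1)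

-- one segment of the text column
def pvSeg (T : List String) (ab : Nat × Nat) : String :=
  PySem.Str.join "" ((T.drop ab.1).take (ab.2 - ab.1))

-- the closed segments, Nat-indexed (proof-side mirror of B's `segs`)
def pvS (ps : List (String × String)) : List String :=
  ((0 :: pvNB ps).zip (pvNB ps)).map (pvSeg (ps.map (fun p => p.2)))

-- prepend a string to the head segment (if any)
def pvHP : String → List String → List String
  | _, [] => []
  | c, x :: xs => (c ++ x) :: xs

theorem pvJoin_nil : PySem.Str.join "" ([] : List String) = "" := by decide

theorem pvJoin_empty_cons (s : String) (l : List String) :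
    PySem.Str.join "" (s :: l) = s ++ PySem.Str.join "" l := by
  cases l <;> simp [PySem.Str.join, PySem.Chars.join_cons_cons, PySem.Chars.join_nil]

theorem pvNB_enum (ps : List (String × String)) : ∀ (s : Nat),
    (PySem.List.enumerate ps (s : Int)).filterMap
      (fun ip => if ip.2.1 == "bold" then some ip.1 else none)
    = (pvNB ps).map (fun k => ((s + k : Nat) : Int)) := by
  induction ps with
  | nil => intro s; simp [pvNB, PySem.List.enumerate]
  | cons p ps ih =>
    intro s
    rw [PySem.List.enumerate_cons, List.filterMap_cons]
    have h1 : ((s : Int) + 1) = (((s + 1 : Nat)) : Int) := by push_cast; ring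
    rw [h1, ih (s + 1)]
    by_cases hb : p.1 == "bold" <;> simp [pvNB, hb] <;> (intro a _; omega)

theorem pvSeg_zero (T : List String) : pvSeg T (0, 0) = "" := by
  simp [pvSeg, pvJoin_nil]

theorem pvSeg_head (t : String) (T : List String) (m : Nat) :
    pvSeg (t :: T) (0, m + 1) = t ++ pvSeg T (0, m) := by
  simp [pvSeg, pvJoin_empty_cons]

theorem pvSeg_shift (t : String) (T : List String) (a b : Nat) :
    pvSeg (t :: T) (a + 1, b + 1) = pvSeg T (a, b) := by
  simp [pvSeg]

theorem pvSeg_zip_shift (xs ys : List Nat) (t : String) (T : List String) :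
    ((xs.map (· + 1)).zip (ys.map (· + 1))).map (pvSeg (t :: T))
      = (xs.zip ys).map (pvSeg T) := by
  rw [List.zip_map, List.map_map]
  apply List.map_congr_left
  rintro ⟨a, b⟩ _
  simpa using pvSeg_shift t T a b

theorem pvS_cons (p : String × String) (ps : List (String × String)) :
    pvS (p :: ps) = if p.1 == "bold" then "" :: pvHP p.2 (pvS ps) else pvHP p.2 (pvS ps) := by
  by_cases hb : p.1 == "bold" <;>
  cases hnb : pvNB ps with
  | nil =>
      simp [pvS, pvNB, hb, hnb, pvHP, pvSeg_zero]
  | cons m ms =>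
      have hshift := pvSeg_zip_shift (m :: ms) ms p.2 (ps.map (fun q => q.2))
      simp only [List.map_cons] at hshift
      simp [pvS, pvNB, hb, hnb, pvHP, List.zip_cons_cons, pvSeg_zero,
        pvSeg_head, hshift]

theorem pvHP_comp (c d : String) (l : List String) :
    pvHP c (pvHP d l) = pvHP (c ++ d) l := by
  cases l <;> simp [pvHP, String.append_assoc]

theorem pvHP_empty (l : List String) : pvHP "" l = l := by
  cases l <;> simp [pvHP]

theorem pvFoldA (ps : List (String × String)) : ∀ (acc : List String) (cur : String),
    (ps.foldl (fun (st : List String × String) par =>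
      let st := if par.1 == "bold" then (st.1 ++ [st.2], "") else st
      (st.1, st.2 ++ par.2)) (acc, cur)).1
    = acc ++ pvHP cur (pvS ps) := by
  induction ps with
  | nil => intro acc cur; simp [pvS, pvNB, pvHP]
  | cons p ps ih =>
    intro acc cur
    rw [pvS_cons]
    by_cases hb : p.1 == "bold"
    · simp only [List.foldl_cons, hb, if_pos]
      rw [ih (acc ++ [cur]) ("" ++ p.2)]
      simp [pvHP, List.append_assoc]
    · simp only [List.foldl_cons, hb, if_neg, Bool.false_eq_true, not_false_iff]
      rw [ih acc (cur ++ p.2)]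
      simp [pvHP_comp]

theorem pvAlt_eq_pvS_filter (pars : List (String × String)) :
    clean_up_pars_py_alt pars
      = (pvS pars).filter (fun s => s != "" && !(PySem.Str.strIsspace s)) := by
  have hcast : (fun k : Nat => ((0 + k : Nat) : Int)) = (fun k : Nat => (k : Int)) := by
    funext k; simp
  have hb : (PySem.List.enumerate pars 0).filterMap
      (fun ip => if ip.2.1 == "bold" then some ip.1 else none)
      = (pvNB pars).map (fun (k : Nat) => (k : Int)) := by
    have h := pvNB_enum pars 0
    rw [Nat.cast_zero, hcast] at h
    exact h
  show ((((0 : Int) :: (PySem.List.enumerate pars 0).filterMap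
      (fun ip => if ip.2.1 == "bold" then some ip.1 else none)).zip
        ((PySem.List.enumerate pars 0).filterMap
      (fun ip => if ip.2.1 == "bold" then some ip.1 else none))).map
      (fun ab => PySem.Str.join ""
        (PySem.List.slice (pars.map (fun p => p.2)) (some ab.1) (some ab.2)))).filter
      (fun s => s != "" && !(PySem.Str.strIsspace s)) = _
  rw [hb]
  congr 1
  have h0 : (0 : Int) :: (pvNB pars).map (fun (k : Nat) => (k : Int))
      = ((0 :: pvNB pars).map (fun (k : Nat) => (k : Int))) := by simp
  rw [h0, List.zip_map, List.map_map]
  unfold pvS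
  apply List.map_congr_left
  rintro ⟨a, b⟩ _
  simp [pvSeg, PySem.List.slice_natCast]

-- ===== VERDICT (by name: the statement is the Claim_ definition above) =====
theorem clean_up_pars_py_spec : Claim_equal_clean_up_pars_py := by
  intro pars _
  unfold Spec_clean_up_pars_py
  show ((pars.foldl (fun (st : List String × String) par =>
      let st := if par.1 == "bold" then (st.1 ++ [st.2], "") else st
      (st.1, st.2 ++ par.2)) ([], "")).1).filter
      (fun p => p != "" && !(PySem.Str.strIsspace p)) = clean_up_pars_py_alt pars
  rw [pvFoldA pars [] "", pvAlt_eq_pvS_filter, List.nil_append, pvHP_empty]
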